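-- pv_equiv track=rewrite | github.com/HotelASP/Recon | run_recon.py | _parse_port_list
-- ===== SOURCE A (Python) =====
-- from typing import Dict, Iterable, List, Mapping, Optional, Sequence, Set, TextIO, Tuple, Union
--
-- def _parse_port_list(port_text: str) -> List[int]:
--     if not port_text:
--         return []
--     ports: List[int] = []
--     for entry in port_text.split(","):
--         cleaned = entry.strip()
--         if not cleaned:
--             continue
--         if not cleaned.isdigit():
--             raise SystemExit(
--                 "Target files must specify ports as integers separated by commas"
--             )
--         value = int(cleaned)
--         if not 1 <= value <= 65535:
--             raise SystemExit("Target ports must be between 1 and 65535")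
--         ports.append(value)
--     return sorted(dict.fromkeys(ports))
-- ===== SOURCE B (Python) =====
-- def _parse_port_list(port_text: str) -> list:
--     if not port_text:
--         return []
--     tokens = [t for t in (e.strip() for e in port_text.split(",")) if t]
--     if not all(t.isdigit() for t in tokens):
--         raise SystemExit(
--             "Target files must specify ports as integers separated by commas"
--         )
--     values = {int(t) for t in tokens}
--     if not all(1 <= v <= 65535 for v in values):
--         raise SystemExit("Target ports must be between 1 and 65535")
--     return [p for p in range(1, 65536) if p in values]
-- ===== Notes on version B (the rewrite author's own statement) =====
-- stated objective: alternative
-- what changed: Replaces A's single validating accumulator loop plus sorted(dict.fromkeys(...)) with a staged pipeline: strip/filter the tokens, validate each stage with all(...) as a whole, collect the values into a set, and emit the sorted unique result by one ascending scan of the bounded key range 1..65535 instead of sorting.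
import Mathlib
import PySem

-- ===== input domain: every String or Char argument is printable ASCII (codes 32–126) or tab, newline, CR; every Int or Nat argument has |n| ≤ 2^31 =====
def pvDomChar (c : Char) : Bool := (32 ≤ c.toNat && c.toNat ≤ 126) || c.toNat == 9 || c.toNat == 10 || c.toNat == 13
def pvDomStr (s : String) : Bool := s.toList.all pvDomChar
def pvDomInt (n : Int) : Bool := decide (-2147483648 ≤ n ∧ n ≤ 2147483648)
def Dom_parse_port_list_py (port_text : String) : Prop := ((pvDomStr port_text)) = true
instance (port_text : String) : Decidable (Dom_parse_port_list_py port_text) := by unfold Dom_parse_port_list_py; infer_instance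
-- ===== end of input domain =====

-- B replaces A's single validating accumulator loop + sorted(dict.fromkeys(...)) with a staged
-- map/filter pipeline, whole-stage all(...) validation, a value set, and one ascending scan of
-- the bounded port range 1..65535 (alternative decomposition, no sort).

-- ===== PORT A =====
-- validation loop of A; 'none' = the SystemExit raise (excluded by Pre_)
def pvGoA : List String → List Int → Option (List Int)
  | [], ports => some ports
  | e :: rest, ports =>
    let cleaned := PySem.Str.strip e
    if cleaned = "" then pvGoA rest ports
    else if PySem.Str.strIsdigit cleaned = false then none
    else
      match PySem.Int.ofStr? cleaned with
      | none => none
      | some value =>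
        if 1 ≤ value ∧ value ≤ 65535 then pvGoA rest (ports ++ [value]) else none

def parse_port_list_py (port_text : String) : List Int :=
  if port_text = "" then []
  else
    match pvGoA (((PySem.Str.split? port_text ",").getD [])) [] with
    | none => []  -- SystemExit path, outside Pre_
    | some ports => PySem.List.sorted (PySem.List.dedup ports) (fun x => x) false

-- ===== PORT B =====
def parse_port_list_py_alt (port_text : String) : List Int :=
  if port_text = "" then []
  else
    let tokens := ((((PySem.Str.split? port_text ",").getD []).map PySem.Str.strip).filter
      (fun t => !(t == "")))
    if !(tokens.all (fun t => PySem.Str.strIsdigit t)) then []  -- SystemExit, outside Pre_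
    else
      -- int(t) on an all-digit token always succeeds, so getD 0 is never taken
      let values := PySem.Set.ofList (tokens.map (fun t => (PySem.Int.ofStr? t).getD 0))
      if !(values.all (fun v => decide (1 ≤ v ∧ v ≤ 65535))) then []  -- SystemExit, outside Pre_
      else (PySem.List.pyRange 1 65536 1).filter (fun p => PySem.Set.contains values p)

-- ===== PRECONDITION & SPEC =====
-- a comma token is acceptable if it strips to empty or to a digit string naming a port in 1..65535
def pvTokOk (e : String) : Bool :=
  let c := PySem.Str.strip e
  (c == "") || (PySem.Str.strIsdigit c && ((PySem.Int.ofStr? c).any fun v => decide (1 ≤ v ∧ v ≤ 65535)))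

-- Pre_ excludes exactly the inputs on which A raises SystemExit (a non-digit token or a port out of 1..65535)
def Pre_parse_port_list_py (port_text : String) : Prop :=
  ∀ e ∈ ((PySem.Str.split? port_text ",").getD []), pvTokOk e = true
instance (port_text : String) : Decidable (Pre_parse_port_list_py port_text) := by
  unfold Pre_parse_port_list_py; infer_instance

def pvWitness_parse_port_list_py : String := " 443 ,80,443,,8080"

def Spec_parse_port_list_py (port_text : String) (out : List Int) : Prop := out = parse_port_list_py_alt port_text
instance (port_text : String) (out : List Int) : Decidable (Spec_parse_port_list_py port_text out) := by unfold Spec_parse_port_list_py; infer_instance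

-- ===== CLAIM =====
def Claim_equal_parse_port_list_py : Prop := ∀ (port_text : String), Dom_parse_port_list_py port_text → Pre_parse_port_list_py port_text → Spec_parse_port_list_py port_text (parse_port_list_py port_text)

-- ===== LEMMAS AND PROOFS =====

-- the cleaned nonempty tokens, and their integer values, as B's pipeline computes them
def pvToks (es : List String) : List String :=
  (es.map PySem.Str.strip).filter (fun t => !(t == ""))
def pvVals (es : List String) : List Int :=
  (pvToks es).map (fun t => (PySem.Int.ofStr? t).getD 0)

-- under Pre_, A's loop never raises and accumulates exactly the pipeline's values, in order
theorem pvGoA_eq (es : List String) (hok : ∀ e ∈ es, pvTokOk e = true) :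
    ∀ acc, pvGoA es acc = some (acc ++ pvVals es) := by
  induction es with
  | nil => intro acc; simp [pvGoA, pvVals, pvToks]
  | cons e rest ih =>
    intro acc
    have he := hok e List.mem_cons_self
    have hrest : ∀ e ∈ rest, pvTokOk e = true := fun x hx => hok x (List.mem_cons_of_mem _ hx)
    simp only [pvTokOk, Bool.or_eq_true, Bool.and_eq_true, beq_iff_eq, Option.any_eq_true,
      decide_eq_true_eq] at he
    simp only [pvGoA]
    rcases he with he | ⟨hd, v, hv, hb⟩
    · rw [if_pos he, ih hrest]
      simp [pvVals, pvToks, he]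
    · have hne : PySem.Str.strip e ≠ "" := by
        intro hc; rw [hc] at hd; exact absurd hd (by decide)
      rw [if_neg hne, if_neg (by simp only [hd]; decide)]
      simp only [hv]
      rw [if_pos hb, ih hrest]
      simp [pvVals, pvToks, hne, hv]

-- every pipeline value lies in 1..65535 under Pre_
theorem pvVals_bounds (es : List String) (hok : ∀ e ∈ es, pvTokOk e = true) :
    ∀ p ∈ pvVals es, 1 ≤ p ∧ p ≤ 65535 := by
  intro p hp
  simp only [pvVals, pvToks, List.mem_map, List.mem_filter] at hp
  obtain ⟨t, ⟨⟨e, he, rfl⟩, hne⟩, rfl⟩ := hp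
  have := hok e he
  simp only [pvTokOk, Bool.or_eq_true, Bool.and_eq_true, beq_iff_eq, Option.any_eq_true,
    decide_eq_true_eq] at this
  rcases this with h | ⟨_, v, hv, hb⟩
  · simp [h] at hne
  · simp [hv]; exact hb

-- every pipeline token is all-digits under Pre_
theorem pvToks_digit (es : List String) (hok : ∀ e ∈ es, pvTokOk e = true) :
    ∀ t ∈ pvToks es, PySem.Str.strIsdigit t = true := by
  intro t ht
  simp only [pvToks, List.mem_filter, List.mem_map] at ht
  obtain ⟨⟨e, he, rfl⟩, hne⟩ := ht
  have := hok e he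
  simp only [pvTokOk, Bool.or_eq_true, Bool.and_eq_true, beq_iff_eq, Option.any_eq_true] at this
  rcases this with h | ⟨hd, _⟩
  · simp [h] at hne
  · exact hd

-- sorted unique characterisation: sorting the dedup equals scanning the bounded range
theorem pv_sorted_eq_scan (ports : List Int) (hb : ∀ p ∈ ports, 1 ≤ p ∧ p ≤ 65535) :
    PySem.List.sorted (PySem.List.dedup ports) (fun x => x) false
      = (PySem.List.pyRange 1 65536 1).filter (fun p => PySem.Set.contains (PySem.Set.ofList ports) p) := by
  apply PySem.List.sorted_eq_of_perm_of_pairwise_lt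
  · rw [PySem.List.dedup_eq_ofList]
    apply (List.perm_ext_iff_of_nodup ?_ ?_).mpr
    · intro a
      simp only [List.mem_filter, PySem.List.mem_pyRange_one, PySem.Set.mem_ofList]
      constructor
      · rintro ⟨-, h⟩
        simpa [PySem.Set.contains] using h
      · intro h
        have := hb a h
        exact ⟨⟨by omega, by omega⟩, by simpa [PySem.Set.contains] using h⟩
    · exact (PySem.List.nodup_pyRange_one 1 65536).filter _
    · exact PySem.Set.nodup_ofList ports
  · exact (PySem.List.pairwise_lt_pyRange_one 1 65536).filter _

-- ===== VERDICT =====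
theorem parse_port_list_py_spec : Claim_equal_parse_port_list_py := by
  intro port_text _ hpre
  unfold Spec_parse_port_list_py parse_port_list_py parse_port_list_py_alt
  by_cases hempty : port_text = ""
  · simp [hempty]
  · rw [if_neg hempty, if_neg hempty]
    set es := ((PySem.Str.split? port_text ",").getD []) with hes
    rw [pvGoA_eq es hpre []]
    simp only [List.nil_append]
    have hdig : (pvToks es).all (fun t => PySem.Str.strIsdigit t) = true := by
      rw [List.all_eq_true]; exact pvToks_digit es hpre
    have hvals : ∀ p ∈ pvVals es, 1 ≤ p ∧ p ≤ 65535 := pvVals_bounds es hpre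
    have hrange : (PySem.Set.ofList (pvVals es)).all (fun v => decide (1 ≤ v ∧ v ≤ 65535)) = true := by
      rw [List.all_eq_true]
      intro v hv
      have : v ∈ pvVals es := (PySem.Set.mem_ofList _ _).mp hv
      simpa using hvals v this
    show PySem.List.sorted (PySem.List.dedup (pvVals es)) (fun x => x) false = _
    rw [show ((es.map PySem.Str.strip).filter (fun t => !(t == ""))) = pvToks es from rfl]
    rw [hdig]
    simp only [Bool.not_true, Bool.false_eq_true, if_false]
    rw [show (pvToks es).map (fun t => (PySem.Int.ofStr? t).getD 0) = pvVals es from rfl]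
    rw [hrange]
    simp only [Bool.not_true, Bool.false_eq_true, if_false]
    exact pv_sorted_eq_scan (pvVals es) hvals
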